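-- pv_equiv track=rewrite | github.com/jochie/EverybodyCodes | 2024/Q09/P1/code.py | stamp_beetles
-- ===== SOURCE A (Python) =====
-- def stamp_beetles(opts, brightness):
--     beetles = [10, 5, 3, 1]
--     count = 0
--     while brightness > 0:
--         for beetle in beetles:
--             if brightness >= beetle:
--                 count += 1
--                 brightness -= beetle
--                 break
--     return count
-- ===== SOURCE B (Python) =====
-- def stamp_beetles(opts, brightness):
--     if brightness <= 0:
--         return 0
--     # greedy on {10,5,3,1}: take brightness//10 tens, then the residue 0..9
--     # needs a fixed number of stamps given by this table
--     residue_stamps = [0, 1, 2, 1, 2, 1, 2, 3, 2, 3]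
--     q, r = divmod(brightness, 10)
--     return q + residue_stamps[r]
-- ===== Notes on version B (the rewrite author's own statement) =====
-- stated objective: faster
-- what changed: Replaced the per-stamp greedy while-loop by a closed-form divmod by 10 plus a 10-entry lookup table for the residue.
import Mathlib
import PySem

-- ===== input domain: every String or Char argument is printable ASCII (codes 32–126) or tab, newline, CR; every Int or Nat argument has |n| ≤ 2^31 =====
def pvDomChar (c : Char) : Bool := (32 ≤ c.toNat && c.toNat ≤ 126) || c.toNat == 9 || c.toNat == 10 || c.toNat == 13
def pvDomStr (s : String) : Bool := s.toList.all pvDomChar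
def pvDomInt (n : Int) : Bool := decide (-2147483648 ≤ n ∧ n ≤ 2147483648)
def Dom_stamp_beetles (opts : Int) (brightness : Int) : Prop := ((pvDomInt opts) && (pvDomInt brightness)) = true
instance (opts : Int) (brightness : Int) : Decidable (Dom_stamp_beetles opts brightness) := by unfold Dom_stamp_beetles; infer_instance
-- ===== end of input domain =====

-- B replaces A's per-stamp greedy while-loop by a closed-form divmod-by-10 plus a residue table (O(1) vs O(brightness)).


-- ===== PORT A =====
-- while brightness > 0: take the first beetle in [10,5,3,1] with brightness >= beetle
-- (the for-with-break over the literal list [10,5,3,1] is written as the if-chain below)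
def stampLoopA (count : Int) (brightness : Int) : Int :=
  if _h : brightness > 0 then
    if brightness ≥ 10 then stampLoopA (count + 1) (brightness - 10)
    else if brightness ≥ 5 then stampLoopA (count + 1) (brightness - 5)
    else if brightness ≥ 3 then stampLoopA (count + 1) (brightness - 3)
    else stampLoopA (count + 1) (brightness - 1)
  else count
termination_by brightness.toNat
decreasing_by all_goals omega

def stamp_beetles (opts : Int) (brightness : Int) : Int :=
  stampLoopA 0 brightness

-- ===== PORT B =====
def stamp_beetles_alt (opts : Int) (brightness : Int) : Int :=
  if brightness ≤ 0 then 0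
  else
    let residue_stamps : List Int := [0, 1, 2, 1, 2, 1, 2, 3, 2, 3]
    let q := PySem.Int.floordiv brightness 10
    let r := PySem.Int.mod brightness 10
    -- residue_stamps[r] never raises (0 ≤ r < 10), so the Option is defaulted
    q + (PySem.List.pyGet? residue_stamps r).getD 0

-- ===== PRECONDITION & SPEC =====
def Spec_stamp_beetles (opts : Int) (brightness : Int) (out : Int) : Prop := out = stamp_beetles_alt opts brightness
instance (opts : Int) (brightness : Int) (out : Int) : Decidable (Spec_stamp_beetles opts brightness out) := by unfold Spec_stamp_beetles; infer_instance

-- ===== CLAIM (what is proved, stated in full; the proofs are below) =====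
def Claim_equal_stamp_beetles : Prop := ∀ (opts : Int) (brightness : Int), Dom_stamp_beetles opts brightness → Spec_stamp_beetles opts brightness (stamp_beetles opts brightness)

-- ===== LEMMAS AND PROOFS =====

-- closed form of B's value, with fdiv/fmod written out for omega
def gClosed (b : Int) : Int :=
  if b ≤ 0 then 0
  else Int.fdiv b 10 + (PySem.List.pyGet? ([0, 1, 2, 1, 2, 1, 2, 3, 2, 3] : List Int) (Int.fmod b 10)).getD 0

lemma alt_eq_gClosed (opts b : Int) : stamp_beetles_alt opts b = gClosed b := by
  simp [stamp_beetles_alt, gClosed, PySem.Int.floordiv, PySem.Int.mod]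

lemma gClosed_residue (r : Int) (h0 : 0 < r) (h9 : r < 10) :
    gClosed r = (PySem.List.pyGet? ([0, 1, 2, 1, 2, 1, 2, 3, 2, 3] : List Int) r).getD 0 := by
  interval_cases r <;> norm_num [gClosed, Int.fdiv, Int.fmod]

lemma gClosed_sub_ten (b : Int) (h : b ≥ 10) : gClosed b = 1 + gClosed (b - 10) := by
  rcases eq_or_lt_of_le h with h10 | hgt
  · subst h10; decide
  · have hb : ¬ b ≤ 0 := by omega
    have hb' : ¬ b - 10 ≤ 0 := by omega
    have hd : Int.fdiv b 10 = Int.fdiv (b - 10) 10 + 1 := by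
      have : b - 10 = 10 * Int.fdiv (b - 10) 10 + Int.fmod (b - 10) 10 :=
        (Int.mul_fdiv_add_fmod (b - 10) 10).symm
      have hm0 : 0 ≤ Int.fmod (b - 10) 10 := Int.fmod_nonneg (by omega) (by norm_num)
      have hm9 : Int.fmod (b - 10) 10 < 10 := Int.fmod_lt_of_pos _ (by norm_num)
      have : b = 10 * (Int.fdiv (b - 10) 10 + 1) + Int.fmod (b - 10) 10 := by omega
      have h2 := Int.mul_fdiv_add_fmod b 10
      have hm0' : 0 ≤ Int.fmod b 10 := Int.fmod_nonneg (by omega) (by norm_num)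
      have hm9' : Int.fmod b 10 < 10 := Int.fmod_lt_of_pos _ (by norm_num)
      omega
    have hm : Int.fmod b 10 = Int.fmod (b - 10) 10 := by
      have h2 := Int.mul_fdiv_add_fmod b 10
      have h3 := Int.mul_fdiv_add_fmod (b - 10) 10
      omega
    simp only [gClosed, if_neg hb, if_neg hb', hd, hm]
    ring

lemma stampLoopA_eq (n : Nat) : ∀ (count b : Int), b.toNat ≤ n → stampLoopA count b = count + gClosed b := by
  induction n with
  | zero =>
    intro count b hb
    have : b ≤ 0 := by omega
    rw [stampLoopA]
    simp [gClosed, this, not_lt.mpr this]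
  | succ n ih =>
    intro count b hb
    by_cases hpos : b > 0
    · rw [stampLoopA, dif_pos hpos]
      by_cases h10 : b ≥ 10
      · rw [if_pos h10, ih (count + 1) (b - 10) (by omega), gClosed_sub_ten b h10]; ring
      · rw [if_neg h10]
        have hr : gClosed b = (PySem.List.pyGet? ([0, 1, 2, 1, 2, 1, 2, 3, 2, 3] : List Int) b).getD 0 :=
          gClosed_residue b hpos (by omega)
        by_cases h5 : b ≥ 5
        · rw [if_pos h5, ih (count + 1) (b - 5) (by omega), hr]
          interval_cases b <;> norm_num [gClosed, PySem.List.pyGet?, PySem.List.pyIdx?, Int.fdiv, Int.fmod, Int.toNat] <;> omega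
        · rw [if_neg h5]
          by_cases h3 : b ≥ 3
          · rw [if_pos h3, ih (count + 1) (b - 3) (by omega), hr]
            interval_cases b <;> norm_num [gClosed, PySem.List.pyGet?, PySem.List.pyIdx?, Int.fdiv, Int.fmod, Int.toNat] <;> omega
          · rw [if_neg h3, ih (count + 1) (b - 1) (by omega), hr]
            interval_cases b <;> norm_num [gClosed, PySem.List.pyGet?, PySem.List.pyIdx?, Int.fdiv, Int.fmod, Int.toNat] <;> omega
    · rw [stampLoopA, dif_neg hpos]
      simp [gClosed, show b ≤ 0 by omega]

-- ===== VERDICT (by name: the statement is the Claim_ definition above) =====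
theorem stamp_beetles_spec : Claim_equal_stamp_beetles := by
  intro opts b _
  unfold Spec_stamp_beetles stamp_beetles
  rw [alt_eq_gClosed, stampLoopA_eq b.toNat 0 b le_rfl, zero_add]
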